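-- pv_equiv track=rewrite | github.com/davidbroughsmyth/jlf | jira_stats/publisher.py | format_states
-- ===== SOURCE A (Python) =====
-- _state_default_colours = ['#8dd3c7',
--                           '#ffffb3',
--                           '#bebada',
--                           '#fb8072',
--                           '#80b1d3',
--                           '#fdb462',
--                           '#b3de69',
--                           '#fccde5',
--                           '#d9d9d9',
--                           '#bc80bd',
--                           '#ccebc5',
--                           '#ffed6f']
--
-- def format_states(states):
--
--     formats = {}
--
--     for index, state in enumerate(states):
--         try:
--             formats[state] = {'color': _state_default_colours[index]}
--         except IndexError:
--             rebased_index = index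
--             while rebased_index >= len(_state_default_colours):
--                 rebased_index = rebased_index - len(_state_default_colours)
--             formats[state] = {'color': _state_default_colours[rebased_index]}
--
--     return formats
-- ===== SOURCE B (Python) =====
-- from itertools import cycle
--
-- _state_default_colours = ['#8dd3c7',
--                           '#ffffb3',
--                           '#bebada',
--                           '#fb8072',
--                           '#80b1d3',
--                           '#fdb462',
--                           '#b3de69',
--                           '#fccde5',
--                           '#d9d9d9',
--                           '#bc80bd',
--                           '#ccebc5',
--                           '#ffed6f']
--
-- def format_states(states):
--     return {state: {'color': colour}
--             for state, colour in zip(states, cycle(_state_default_colours))}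
-- ===== Notes on version B (the rewrite author's own statement) =====
-- stated objective: idiomatic
-- what changed: B replaces the enumerate index with try/except IndexError and a while-loop that rebases the index by repeated subtraction by a dict comprehension zipping states against itertools.cycle of the colour list, so no index arithmetic or exception handling remains.
import Mathlib
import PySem

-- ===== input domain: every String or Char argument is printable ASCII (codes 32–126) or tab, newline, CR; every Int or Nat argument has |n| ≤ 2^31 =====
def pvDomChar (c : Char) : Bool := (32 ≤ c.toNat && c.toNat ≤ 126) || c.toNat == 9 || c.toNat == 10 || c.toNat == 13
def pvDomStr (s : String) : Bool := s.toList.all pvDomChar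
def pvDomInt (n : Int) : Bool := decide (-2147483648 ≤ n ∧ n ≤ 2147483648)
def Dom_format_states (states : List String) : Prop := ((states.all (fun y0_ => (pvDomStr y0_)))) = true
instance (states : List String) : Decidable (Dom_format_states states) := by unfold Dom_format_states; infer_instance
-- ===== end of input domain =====

-- B replaces A's index arithmetic + try/except with a zip against a cycled colour stream (idiomatic).

-- ===== PORT A =====
def stateDefaultColours : List String :=
  ["#8dd3c7", "#ffffb3", "#bebada", "#fb8072", "#80b1d3", "#fdb462",
   "#b3de69", "#fccde5", "#d9d9d9", "#bc80bd", "#ccebc5", "#ffed6f"]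

-- 'while rebased_index >= len(colours): rebased_index -= len(colours)'
def rebaseIndex (i : Nat) : Nat :=
  if _h : stateDefaultColours.length ≤ i then rebaseIndex (i - stateDefaultColours.length) else i
decreasing_by simp [stateDefaultColours] at *; omega

-- the loop body: try colours[index] except IndexError → colours[rebased_index]
-- (the rebased index is always in range, so getD's default is never used)
def colourA (i : Nat) : String :=
  match PySem.List.pyGet? stateDefaultColours (i : Int) with
  | some c => c
  | none => stateDefaultColours.getD (rebaseIndex i) ""

def formatStatesLoop : List String → Nat → PySem.Dict String (List (String × String)) →
    PySem.Dict String (List (String × String))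
  | [], _, d => d
  | s :: rest, i, d => formatStatesLoop rest (i + 1) (d.insert s [("color", colourA i)])

def format_states (states : List String) : List (String × List (String × String)) :=
  (formatStatesLoop states 0 PySem.Dict.empty).items

-- ===== PORT B =====
-- itertools.cycle(_state_default_colours), consumed n times: take the next colour,
-- restarting from the full list when the remainder runs out
def cycleTake : Nat → List String → List String → List String
  | 0, _, _ => []
  | n + 1, c :: cs, full => c :: cycleTake n cs full
  | n + 1, [], full =>
      match full with
      | [] => []
      | c :: cs => c :: cycleTake n cs full

def format_states_alt (states : List String) : List (String × List (String × String)) :=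
  ((states.zip (cycleTake states.length stateDefaultColours stateDefaultColours)).foldl
    (fun d p => d.insert p.1 [("color", p.2)]) PySem.Dict.empty).items

-- ===== PRECONDITION & SPEC =====
def Spec_format_states (states : List String) (out : List (String × List (String × String))) : Prop := out = format_states_alt states
instance (states : List String) (out : List (String × List (String × String))) : Decidable (Spec_format_states states out) := by unfold Spec_format_states; infer_instance

-- ===== CLAIM (what is proved, stated in full; the proofs are below) =====
def Claim_equal_format_states : Prop := ∀ (states : List String), Dom_format_states states → Spec_format_states states (format_states states)

-- ===== LEMMAS AND PROOFS =====

lemma rebaseIndex_eq (i : Nat) : rebaseIndex i = i % 12 := by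
  induction i using Nat.strong_induction_on with
  | _ i ih =>
    rw [rebaseIndex]
    simp only [stateDefaultColours, List.length]
    split_ifs with h
    · rw [ih (i - 12) (by omega)]
      omega
    · omega

lemma colourA_eq (i : Nat) : colourA i = stateDefaultColours.getD (i % 12) "" := by
  unfold colourA
  rcases h : PySem.List.pyGet? stateDefaultColours (i : Int) with _ | c
  · rw [rebaseIndex_eq]
  · rw [PySem.List.pyGet?_natCast] at h
    have hlt : i < stateDefaultColours.length := by
      by_contra hge
      simp [List.getElem?_eq_none (by omega : stateDefaultColours.length ≤ i)] at h
    have hi : i % 12 = i := Nat.mod_eq_of_lt (by simpa [stateDefaultColours] using hlt)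
    rw [List.getElem?_eq_getElem hlt] at h
    simp [hi, List.getD, List.getElem?_eq_getElem hlt]
    exact (Option.some.inj h).symm

lemma cycleTake_nil_restart (n : Nat) (c : String) (cs : List String) :
    cycleTake n [] (c :: cs) = cycleTake n (c :: cs) (c :: cs) := by
  cases n <;> rfl

lemma loop_eq_fold (states : List String) :
    ∀ (i : Nat) (d : PySem.Dict String (List (String × String))),
      formatStatesLoop states i d =
        (states.zip (cycleTake states.length (stateDefaultColours.drop (i % 12)) stateDefaultColours)).foldl
          (fun d p => d.insert p.1 [("color", p.2)]) d := by
  induction states with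
  | nil => intro i d; rfl
  | cons s rest ih =>
    intro i d
    have hr : i % 12 < 12 := Nat.mod_lt _ (by norm_num)
    have hstep :
        cycleTake (rest.length + 1) (stateDefaultColours.drop (i % 12)) stateDefaultColours =
          stateDefaultColours.getD (i % 12) "" ::
            cycleTake rest.length (stateDefaultColours.drop ((i + 1) % 12)) stateDefaultColours := by
      have h12 : (i + 1) % 12 = (i % 12 + 1) % 12 := by omega
      rw [h12]
      interval_cases h : (i % 12) <;>
        simp [stateDefaultColours, cycleTake, cycleTake_nil_restart]
    simp only [formatStatesLoop, List.length_cons, hstep, List.zip_cons_cons, List.foldl_cons]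
    rw [ih (i + 1), colourA_eq]

-- ===== VERDICT (by name: the statement is the Claim_ definition above) =====
theorem format_states_spec : Claim_equal_format_states := by
  intro states _
  unfold Spec_format_states format_states format_states_alt
  rw [loop_eq_fold states 0 PySem.Dict.empty]
  rfl
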